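-- pv_equiv track=rewrite | github.com/ecoshub/tsp-new-organization | tools/iteration_tools.py | uniq_line_iterator
-- ===== SOURCE A (Python) =====
-- def uniq_line_iterator(points, ignore_list=[]):
--     lenp = len(points)
--     for i in range(lenp):
--         for j in range(i + 1, lenp):
--             if i != j:
--                 if i not in ignore_list:
--                     if j not in ignore_list:
--                         yield i, j
-- ===== SOURCE B (Python) =====
-- def uniq_line_iterator(points, ignore_list=[]):
--     valid = [i for i in range(len(points)) if i not in ignore_list]
--     n = len(valid)
--     for a in range(n):
--         for b in range(a + 1, n):
--             yield valid[a], valid[b]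
-- ===== Notes on version B (the rewrite author's own statement) =====
-- stated objective: faster
-- what changed: B first materialises the list of surviving indices (one filtering pass over range(len(points))), then runs the nested pair loop over positions within that list, so no ignore_list membership test (and no i != j test) remains inside the quadratic loops.
import Mathlib
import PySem

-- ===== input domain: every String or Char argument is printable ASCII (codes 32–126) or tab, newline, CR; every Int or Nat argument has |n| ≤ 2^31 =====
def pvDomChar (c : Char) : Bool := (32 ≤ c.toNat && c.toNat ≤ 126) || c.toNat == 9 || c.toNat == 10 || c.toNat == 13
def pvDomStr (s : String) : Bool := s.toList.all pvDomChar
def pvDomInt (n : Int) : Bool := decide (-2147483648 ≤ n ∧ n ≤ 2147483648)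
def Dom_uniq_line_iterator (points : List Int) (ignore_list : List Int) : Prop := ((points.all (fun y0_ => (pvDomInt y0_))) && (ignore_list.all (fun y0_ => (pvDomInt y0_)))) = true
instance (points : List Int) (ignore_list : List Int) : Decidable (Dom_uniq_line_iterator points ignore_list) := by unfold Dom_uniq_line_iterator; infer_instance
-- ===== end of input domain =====

-- B pre-filters the surviving indices into a list `valid` and then iterates over
-- positions a < b within `valid`, removing all membership tests from the loops
-- (objective: faster when ignore_list is non-trivial; same output order).

-- ===== PORT A =====
def uniq_line_iterator (points : List Int) (ignore_list : List Int) : List (Int × Int) :=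
  let lenp : Int := points.length
  (PySem.List.pyRange 0 lenp 1).foldl (fun acc i =>
    (PySem.List.pyRange (i + 1) lenp 1).foldl (fun acc2 j =>
      if i ≠ j then
        if i ∉ ignore_list then
          if j ∉ ignore_list then acc2 ++ [(i, j)] else acc2
        else acc2
      else acc2) acc) []

-- ===== PORT B =====
def uniq_line_iterator_alt (points : List Int) (ignore_list : List Int) : List (Int × Int) :=
  let valid : List Int := (PySem.List.pyRange 0 (points.length : Int) 1).filter (fun i => i ∉ ignore_list)
  let n : Int := valid.length
  (PySem.List.pyRange 0 n 1).foldl (fun acc a =>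
    (PySem.List.pyRange (a + 1) n 1).foldl (fun acc2 b =>
      acc2 ++ [(PySem.List.pyGetD valid a 0, PySem.List.pyGetD valid b 0)]) acc) []

-- ===== PRECONDITION & SPEC =====
def Spec_uniq_line_iterator (points : List Int) (ignore_list : List Int) (out : List (Int × Int)) : Prop := out = uniq_line_iterator_alt points ignore_list
instance (points : List Int) (ignore_list : List Int) (out : List (Int × Int)) : Decidable (Spec_uniq_line_iterator points ignore_list out) := by unfold Spec_uniq_line_iterator; infer_instance

-- ===== CLAIM (what is proved, stated in full; the proofs are below) =====
def Claim_equal_uniq_line_iterator : Prop := ∀ (points : List Int) (ignore_list : List Int), Dom_uniq_line_iterator points ignore_list → Spec_uniq_line_iterator points ignore_list (uniq_line_iterator points ignore_list)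

-- ===== LEMMAS AND PROOFS =====

/-- All ordered pairs (earlier, later) of a list, in A's emission order. -/
def pvPairs : List Int → List (Int × Int)
  | [] => []
  | x :: xs => xs.map (fun y => (x, y)) ++ pvPairs xs

/-- B's position-indexed double loop over `l`, in Nat form, produces `pvPairs l`. -/
theorem pvPosPairs_nat (l : List Int) :
    (List.range l.length).flatMap
      (fun k => (l.drop (k + 1)).map (fun y => (l.getD k 0, y))) = pvPairs l := by
  induction l with
  | nil => simp [pvPairs]
  | cons x xs ih =>
      simp only [List.length_cons, List.range_succ_eq_map, List.flatMap_cons,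
        List.flatMap_map, pvPairs]
      simp only [Nat.succ_eq_add_one, List.drop_succ_cons, List.getD_cons_succ,
        List.drop_zero, List.getD_cons_zero]
      rw [← ih]

/-- A's filtered double loop over `pyRange a b 1`, flat-mapped, equals
    `pvPairs` of the filtered range. -/
theorem pvFilterPairs (ig : List Int) (b : Int) : ∀ (n : Nat) (a : Int), b - a = n →
    (PySem.List.pyRange a b 1).flatMap
      (fun i => ((PySem.List.pyRange (i + 1) b 1).filter
          (fun j => decide (i ≠ j ∧ i ∉ ig ∧ j ∉ ig))).map (fun j => (i, j)))
    = pvPairs ((PySem.List.pyRange a b 1).filter (fun i => i ∉ ig)) := by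
  intro n
  induction n with
  | zero =>
      intro a ha
      rw [PySem.List.pyRange_one_eq_nil (by omega)]
      simp [pvPairs]
  | succ m ih =>
      intro a ha
      rw [PySem.List.pyRange_one_cons (by omega)]
      simp only [List.flatMap_cons, List.filter_cons]
      have hrest := ih (a + 1) (by omega)
      by_cases hig : a ∈ ig
      · have h0 : (PySem.List.pyRange (a + 1) b 1).filter
            (fun j => decide (a ≠ j ∧ a ∉ ig ∧ j ∉ ig)) = [] := by
          apply List.filter_eq_nil_iff.mpr
          intro j _
          simp [hig]
        rw [h0, List.map_nil, List.nil_append, hrest]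
        simp [hig]
      · have h1 : (PySem.List.pyRange (a + 1) b 1).filter
            (fun j => decide (a ≠ j ∧ a ∉ ig ∧ j ∉ ig))
            = (PySem.List.pyRange (a + 1) b 1).filter (fun j => decide (j ∉ ig)) := by
          apply List.filter_congr
          intro j hj
          have := (PySem.List.mem_pyRange_one).mp hj
          have hne : a ≠ j := by omega
          simp [hne, hig]
        rw [h1, hrest]
        simp [pvPairs, hig]

/-- B computes `pvPairs valid`. -/
theorem pvAlt_eq (points ig : List Int) :
    uniq_line_iterator_alt points ig
      = pvPairs ((PySem.List.pyRange 0 (points.length : Int) 1).filter (fun i => i ∉ ig)) := by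
  unfold uniq_line_iterator_alt
  set valid := (PySem.List.pyRange 0 (points.length : Int) 1).filter (fun i => i ∉ ig) with hv
  simp only []
  -- turn the two foldl-appends into a flatMap of maps
  have step1 : ∀ (init : List (Int × Int)) (a : Int),
      (PySem.List.pyRange (a + 1) (valid.length : Int) 1).foldl (fun acc2 b =>
        acc2 ++ [(PySem.List.pyGetD valid a 0, PySem.List.pyGetD valid b 0)]) init
      = init ++ (PySem.List.pyRange (a + 1) (valid.length : Int) 1).map
          (fun b => (PySem.List.pyGetD valid a 0, PySem.List.pyGetD valid b 0)) := by
    intro init a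
    exact PySem.List.foldl_append_singleton_eq_map _ _ _
  calc (PySem.List.pyRange 0 (valid.length : Int) 1).foldl (fun acc a =>
        (PySem.List.pyRange (a + 1) (valid.length : Int) 1).foldl (fun acc2 b =>
          acc2 ++ [(PySem.List.pyGetD valid a 0, PySem.List.pyGetD valid b 0)]) acc) []
      = (PySem.List.pyRange 0 (valid.length : Int) 1).foldl (fun acc a =>
          acc ++ (PySem.List.pyRange (a + 1) (valid.length : Int) 1).map
            (fun b => (PySem.List.pyGetD valid a 0, PySem.List.pyGetD valid b 0))) [] := by
        have hfun : (fun (acc : List (Int × Int)) a =>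
            (PySem.List.pyRange (a + 1) (valid.length : Int) 1).foldl (fun acc2 b =>
              acc2 ++ [(PySem.List.pyGetD valid a 0, PySem.List.pyGetD valid b 0)]) acc)
          = (fun acc a => acc ++ (PySem.List.pyRange (a + 1) (valid.length : Int) 1).map
              (fun b => (PySem.List.pyGetD valid a 0, PySem.List.pyGetD valid b 0))) := by
          funext acc a
          exact step1 acc a
        rw [hfun]
    _ = (PySem.List.pyRange 0 (valid.length : Int) 1).flatMap
          (fun a => (PySem.List.pyRange (a + 1) (valid.length : Int) 1).map
            (fun b => (PySem.List.pyGetD valid a 0, PySem.List.pyGetD valid b 0))) := by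
        rw [PySem.List.foldl_append_eq_flatMap, List.nil_append]
    _ = pvPairs valid := by
        rw [PySem.List.pyRange_zero_natCast, List.flatMap_map]
        rw [← pvPosPairs_nat valid]
        apply List.flatMap_congr
        intro k hk
        have hk' : k < valid.length := by simpa using hk
        have hinner : (PySem.List.pyRange ((k : Int) + 1) (valid.length : Int) 1).map
            (fun b => PySem.List.pyGetD valid b 0) = valid.drop (k + 1) := by
          have h := PySem.List.map_pyGetD_pyRange' valid (0 : Int) (a := (k : Int) + 1) (by positivity)
          have ht : ((k : Int) + 1).toNat = k + 1 := by omega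
          rw [ht] at h
          exact h
        calc (PySem.List.pyRange ((k : Int) + 1) (valid.length : Int) 1).map
              (fun b => (PySem.List.pyGetD valid (k : Int) 0, PySem.List.pyGetD valid b 0))
            = ((PySem.List.pyRange ((k : Int) + 1) (valid.length : Int) 1).map
                (fun b => PySem.List.pyGetD valid b 0)).map
                (fun y => (PySem.List.pyGetD valid (k : Int) 0, y)) := by
              rw [List.map_map]; rfl
          _ = (valid.drop (k + 1)).map (fun y => (valid.getD k 0, y)) := by
              rw [hinner, PySem.List.pyGetD_natCast]

/-- A computes `pvPairs valid` too. -/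
theorem pvA_eq (points ig : List Int) :
    uniq_line_iterator points ig
      = pvPairs ((PySem.List.pyRange 0 (points.length : Int) 1).filter (fun i => i ∉ ig)) := by
  unfold uniq_line_iterator
  simp only []
  have step1 : ∀ (init : List (Int × Int)) (i : Int),
      (PySem.List.pyRange (i + 1) (points.length : Int) 1).foldl (fun acc2 j =>
        if i ≠ j then
          if i ∉ ig then
            if j ∉ ig then acc2 ++ [(i, j)] else acc2
          else acc2
        else acc2) init
      = init ++ ((PySem.List.pyRange (i + 1) (points.length : Int) 1).filter
          (fun j => decide (i ≠ j ∧ i ∉ ig ∧ j ∉ ig))).map (fun j => (i, j)) := by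
    intro init i
    have hfun : (fun (acc2 : List (Int × Int)) j =>
        if i ≠ j then
          if i ∉ ig then
            if j ∉ ig then acc2 ++ [(i, j)] else acc2
          else acc2
        else acc2)
      = (fun acc2 j => if (i ≠ j ∧ i ∉ ig ∧ j ∉ ig) then acc2 ++ [(i, j)] else acc2) := by
      funext acc2 j
      by_cases h1 : i = j <;> by_cases h2 : i ∈ ig <;> by_cases h3 : j ∈ ig <;>
        simp [h1, h2, h3]
    rw [hfun]
    exact PySem.List.foldl_append_ite _ _ _ _
  calc (PySem.List.pyRange 0 (points.length : Int) 1).foldl (fun acc i =>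
        (PySem.List.pyRange (i + 1) (points.length : Int) 1).foldl (fun acc2 j =>
          if i ≠ j then
            if i ∉ ig then
              if j ∉ ig then acc2 ++ [(i, j)] else acc2
            else acc2
          else acc2) acc) []
      = (PySem.List.pyRange 0 (points.length : Int) 1).foldl (fun acc i =>
          acc ++ ((PySem.List.pyRange (i + 1) (points.length : Int) 1).filter
            (fun j => decide (i ≠ j ∧ i ∉ ig ∧ j ∉ ig))).map (fun j => (i, j))) [] := by
        have hfun : (fun (acc : List (Int × Int)) i =>
            (PySem.List.pyRange (i + 1) (points.length : Int) 1).foldl (fun acc2 j =>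
              if i ≠ j then
                if i ∉ ig then
                  if j ∉ ig then acc2 ++ [(i, j)] else acc2
                else acc2
              else acc2) acc)
          = (fun acc i => acc ++ ((PySem.List.pyRange (i + 1) (points.length : Int) 1).filter
              (fun j => decide (i ≠ j ∧ i ∉ ig ∧ j ∉ ig))).map (fun j => (i, j))) := by
          funext acc i
          exact step1 acc i
        rw [hfun]
    _ = (PySem.List.pyRange 0 (points.length : Int) 1).flatMap
          (fun i => ((PySem.List.pyRange (i + 1) (points.length : Int) 1).filter
            (fun j => decide (i ≠ j ∧ i ∉ ig ∧ j ∉ ig))).map (fun j => (i, j))) := by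
        rw [PySem.List.foldl_append_eq_flatMap, List.nil_append]
    _ = pvPairs ((PySem.List.pyRange 0 (points.length : Int) 1).filter (fun i => i ∉ ig)) :=
        pvFilterPairs ig (points.length : Int) points.length 0 (by omega)

-- ===== VERDICT (by name: the statement is the Claim_ definition above) =====
theorem uniq_line_iterator_spec : Claim_equal_uniq_line_iterator := by
  intro points ig _
  unfold Spec_uniq_line_iterator
  rw [pvA_eq, pvAlt_eq]
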